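-- pv_equiv track=rewrite | github.com/alea-institute/folio-insights | api/routes/source.py | _extract_breadcrumb
-- ===== SOURCE A (Python) =====
-- def _extract_breadcrumb(content: str, offset: int) -> str:
--     """Extract section breadcrumb from markdown headings preceding *offset*."""
--     lines = content[:offset].split("\n")
--     headings: list[str] = []
--     for line in reversed(lines):
--         stripped = line.strip()
--         if stripped.startswith("#"):
--             level = len(stripped) - len(stripped.lstrip("#"))
--             title = stripped.lstrip("#").strip()
--             if title:
--                 headings.insert(0, title)
--             if level <= 1:
--                 break
--     return " > ".join(headings) if headings else ""
-- ===== SOURCE B (Python) =====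
-- def _extract_breadcrumb(content: str, offset: int) -> str:
--     """Staged pipeline: parse all headings to (level, title) pairs, cut at the last
--     level-1 heading, then join the nonempty titles of the remaining tail."""
--     heads = []
--     for line in content[:offset].split("\n"):
--         s = line.strip()
--         if s.startswith("#"):
--             rest = s.lstrip("#")
--             heads.append((len(s) - len(rest), rest.strip()))
--     cut = None
--     for i, (level, _) in enumerate(heads):
--         if level <= 1:
--             cut = i
--     trail = heads if cut is None else heads[cut:]
--     return " > ".join(title for _, title in trail if title)
-- ===== Notes on version B (the rewrite author's own statement) =====
-- stated objective: alternative
-- what changed: Replaces A's reversed scan with break and front-insertion by a staged pipeline: parse every heading line into a (level, title) pair, find the index of the last level-1 heading, drop everything before it, filter out empty titles and join.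
import Mathlib
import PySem

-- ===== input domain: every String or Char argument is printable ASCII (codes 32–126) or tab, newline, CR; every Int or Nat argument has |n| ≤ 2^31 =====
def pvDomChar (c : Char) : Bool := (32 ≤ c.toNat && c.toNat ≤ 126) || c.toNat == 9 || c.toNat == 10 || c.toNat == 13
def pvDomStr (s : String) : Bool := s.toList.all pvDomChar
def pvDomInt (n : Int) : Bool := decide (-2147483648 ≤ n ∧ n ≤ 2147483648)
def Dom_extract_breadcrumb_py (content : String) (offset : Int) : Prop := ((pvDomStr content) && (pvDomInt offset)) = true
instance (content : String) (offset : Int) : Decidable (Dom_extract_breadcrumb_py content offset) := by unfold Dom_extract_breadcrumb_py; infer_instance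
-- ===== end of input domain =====

-- B replaces A's reversed scan (break, front-insertion) by a staged pipeline: parse all
-- headings into (level, title) pairs, cut at the last level-1 heading, filter, join;
-- objective: alternative (same cost, different decomposition).

-- ===== PORT A =====
-- A's loop: reversed lines, insert(0, title), break on level <= 1.
-- 'stripped.lstrip("#")' is ported by hand as dropWhile (· == '#'): exact, since the strip
-- set is the single character '#'.
def pvALoop : List (List Char) → List (List Char) → List (List Char)
  | [], headings => headings
  | line :: rest, headings =>
    let stripped := PySem.Chars.strip line
    if PySem.Chars.startswith stripped ['#'] then
      let after := stripped.dropWhile (· == '#')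
      let level := stripped.length - after.length
      let title := PySem.Chars.strip after
      let headings' := if title ≠ [] then title :: headings else headings
      if level ≤ 1 then headings' else pvALoop rest headings'
    else pvALoop rest headings

def extract_breadcrumb_py (content : String) (offset : Int) : String :=
  let lines := PySem.Chars.splitOn (PySem.List.slice content.toList none (some offset)) ['\n']
  let headings := pvALoop lines.reverse []
  if headings ≠ [] then String.ofList (PySem.Chars.join [' ', '>', ' '] headings) else ""

-- ===== PORT B =====
-- B stage 1: parse a line into (level, title) when it is a heading.
def pvParse (line : List Char) : Option (Nat × List Char) :=
  let s := PySem.Chars.strip line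
  if PySem.Chars.startswith s ['#'] then
    let rest := s.dropWhile (· == '#')
    some (s.length - rest.length, PySem.Chars.strip rest)
  else none

-- B stage 2: index of the last heading with level <= 1 (Python's enumerate loop).
def pvLastTop (heads : List (Nat × List Char)) : Option Int :=
  (PySem.List.enumerate heads 0).foldl
    (fun cut p => if p.2.1 ≤ 1 then some p.1 else cut) none

def extract_breadcrumb_py_alt (content : String) (offset : Int) : String :=
  let heads := (PySem.Chars.splitOn (PySem.List.slice content.toList none (some offset)) ['\n']).filterMap pvParse
  let trail := match pvLastTop heads with
    | none => heads
    | some i => PySem.List.slice heads (some i) none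
  String.ofList (PySem.Chars.join [' ', '>', ' '] ((trail.map Prod.snd).filter (· ≠ [])))

-- ===== PRECONDITION & SPEC =====
def Spec_extract_breadcrumb_py (content : String) (offset : Int) (out : String) : Prop := out = extract_breadcrumb_py_alt content offset
instance (content : String) (offset : Int) (out : String) : Decidable (Spec_extract_breadcrumb_py content offset out) := by unfold Spec_extract_breadcrumb_py; infer_instance

-- ===== CLAIM (what is proved, stated in full; the proofs are below) =====
def Claim_equal_extract_breadcrumb_py : Prop := ∀ (content : String) (offset : Int), Dom_extract_breadcrumb_py content offset → Spec_extract_breadcrumb_py content offset (extract_breadcrumb_py content offset)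

-- ===== LEMMAS AND PROOFS =====

-- B's tail (cut at the last level-1 heading, then filter), as one function of the heads list.
def pvTrail (heads : List (Nat × List Char)) : List (List Char) :=
  (match pvLastTop heads with
    | none => heads
    | some i => PySem.List.slice heads (some i) none).map Prod.snd |>.filter (· ≠ [])

theorem pvLastTop_snoc (hs : List (Nat × List Char)) (h : Nat × List Char) :
    pvLastTop (hs ++ [h]) = if h.1 ≤ 1 then some (hs.length : Int) else pvLastTop hs := by
  unfold pvLastTop
  rw [PySem.List.enumerate_append, List.foldl_append]
  simp

theorem pvLastTop_lt (hs : List (Nat × List Char)) (i : Int) (hi : pvLastTop hs = some i) :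
    0 ≤ i ∧ i < hs.length := by
  induction hs using List.reverseRecOn with
  | nil => simp [pvLastTop, PySem.List.enumerate] at hi
  | append_singleton hs h ih =>
    rw [pvLastTop_snoc] at hi
    split_ifs at hi with hl
    · cases hi
      refine ⟨Int.natCast_nonneg _, ?_⟩
      simp
    · have := ih hi; simp; omega

theorem pvTrail_snoc (hs : List (Nat × List Char)) (h : Nat × List Char) :
    pvTrail (hs ++ [h]) =
      if h.1 ≤ 1 then (if h.2 ≠ [] then [h.2] else [])
      else pvTrail hs ++ (if h.2 ≠ [] then [h.2] else []) := by
  unfold pvTrail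
  rw [pvLastTop_snoc]
  by_cases hl : h.1 ≤ 1
  · simp only [hl, if_true]
    simp only [PySem.List.slice_from_natCast,
      List.drop_append_of_le_length (Nat.le_refl hs.length), List.drop_length]
    simp [List.filter]
    split_ifs <;> simp_all
  · simp only [hl, if_false]
    cases hc : pvLastTop hs with
    | none =>
      simp [List.filter_append, List.filter]
      split_ifs <;> simp_all
    | some i =>
      obtain ⟨h0, hlt⟩ := pvLastTop_lt hs i hc
      obtain ⟨k, rfl⟩ : ∃ k : Nat, i = (k : Int) := ⟨i.toNat, by omega⟩
      have hk : k ≤ hs.length := by simp at hlt; omega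
      simp only [PySem.List.slice_from_natCast, List.drop_append_of_le_length hk]
      simp [List.filter_append, List.filter]
      split_ifs <;> simp_all

-- A's backward scan over rs with accumulator acc computes B's trail of the forward heads
-- list (rs.filterMap pvParse).reverse, appended to acc.
theorem pvALoop_eq_trail (rs : List (List Char)) (acc : List (List Char)) :
    pvALoop rs acc = pvTrail (rs.filterMap pvParse).reverse ++ acc := by
  induction rs generalizing acc with
  | nil => simp [pvALoop, pvTrail, pvLastTop]
  | cons line rest ih =>
    by_cases hs : PySem.Chars.startswith (PySem.Chars.strip line) ['#']
    · have hp : pvParse line = some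
        ((PySem.Chars.strip line).length - ((PySem.Chars.strip line).dropWhile (· == '#')).length,
         PySem.Chars.strip ((PySem.Chars.strip line).dropWhile (· == '#'))) := by
        simp [pvParse, hs]
      simp only [pvALoop, hs, if_true, List.filterMap_cons, hp, List.reverse_cons]
      rw [pvTrail_snoc]
      split_ifs with h1 h2 h2
      · simp
      · simp
      · rw [ih]; simp
      · rw [ih]; simp
    · have hp : pvParse line = none := by simp [pvParse, hs]
      simp only [pvALoop, hs, List.filterMap_cons, hp]
      exact ih acc

theorem pvGuard (l : List (List Char)) :
    (if l ≠ [] then String.ofList (PySem.Chars.join [' ', '>', ' '] l) else "") =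
      String.ofList (PySem.Chars.join [' ', '>', ' '] l) := by
  cases l <;> simp [PySem.Chars.join, List.intercalate]

theorem pvAlt_eq (content : String) (offset : Int) :
    extract_breadcrumb_py_alt content offset =
      String.ofList (PySem.Chars.join [' ', '>', ' ']
        (pvTrail ((PySem.Chars.splitOn (PySem.List.slice content.toList none (some offset)) ['\n']).filterMap pvParse))) := rfl

-- ===== VERDICT (by name: the statement is the Claim_ definition above) =====
theorem extract_breadcrumb_py_spec : Claim_equal_extract_breadcrumb_py := by
  intro content offset _
  unfold Spec_extract_breadcrumb_py extract_breadcrumb_py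
  simp only [pvALoop_eq_trail, List.append_nil, List.filterMap_reverse, List.reverse_reverse]
  rw [pvGuard, pvAlt_eq]
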